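-- pv_equiv track=rewrite | github.com/cry999/AtCoder | beginner/052/C.py | factors_of_factorial
-- ===== SOURCE A (Python) =====
-- def mul(iterable, mod: int = None)->int:
--     ret = 1
--     for v in iterable:
--         ret *= v
--         if mod:
--             ret %= mod
--     return ret
--
-- def factors_of_factorial(N: int)->int:
--     prime_factors = {}
--
--     for n in range(2, N+1):
--         d = 2
--         while n > 1:
--             if n % d == 0:
--                 prime_factors.setdefault(d, 0)
--             while n % d == 0:
--                 prime_factors[d] += 1
--                 n //= d
--             d += 1
--     return mul((p+1 for p in prime_factors.values()), mod=10**9+7)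
-- ===== SOURCE B (Python) =====
-- def factors_of_factorial(N: int) -> int:
--     # Legendre's formula: for each prime p <= N, the exponent of p in N!
--     # is sum_{k>=1} N // p**k; the divisor count is the product of (exp+1).
--     MOD = 10**9 + 7
--     ans = 1
--     for p in range(2, N + 1):
--         i = 2
--         is_prime = True
--         while i * i <= p:
--             if p % i == 0:
--                 is_prime = False
--                 break
--             i += 1
--         if is_prime:
--             e = 0
--             q = p
--             while q <= N:
--                 e += N // q
--                 q *= p
--             ans = ans * (e + 1) % MOD
--     return ans
-- ===== Notes on version B (the rewrite author's own statement) =====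
-- stated objective: faster
-- what changed: A fully factorizes every n in 2..N by trial division and accumulates exponents in a dict; B instead trial-division-primality-tests each candidate and computes each prime's exponent in N-factorial directly by Legendre's formula (summing the quotients of N by the prime powers), multiplying each exponent-plus-one into the running product under the problem modulus.
import Mathlib
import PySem

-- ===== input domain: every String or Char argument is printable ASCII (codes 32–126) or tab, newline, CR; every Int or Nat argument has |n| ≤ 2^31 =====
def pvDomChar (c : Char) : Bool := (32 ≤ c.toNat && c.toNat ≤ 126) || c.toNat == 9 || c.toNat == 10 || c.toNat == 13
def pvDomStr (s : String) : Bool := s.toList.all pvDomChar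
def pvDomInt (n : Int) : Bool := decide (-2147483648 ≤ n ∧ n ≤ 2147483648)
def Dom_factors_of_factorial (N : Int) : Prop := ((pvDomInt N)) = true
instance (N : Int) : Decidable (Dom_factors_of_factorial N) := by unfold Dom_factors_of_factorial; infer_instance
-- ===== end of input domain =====

-- B replaces A's per-n trial factorisation of every n ≤ N (exponents summed into a dict)
-- by a trial-division primality test plus Legendre's formula per candidate; same values.

-- ===== PORT A =====

-- helper `mul(iterable, mod)`: ret = 1; for v: ret *= v; if mod: ret %= mod
def pvMul (l : List Int) (mod : Option Int) : Int :=
  l.foldl (fun ret v =>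
    let ret := ret * v
    match mod with
    | some m => if m = 0 then ret else PySem.Int.mod ret m
    | none => ret) 1

-- inner `while n % d == 0: prime_factors[d] += 1; n //= d` (the fuel only bounds the
-- iteration count; the call site passes enough, proved in pvDivLoop_spec)
def pvDivLoop : Nat → Int → Int → PySem.Dict Int Int → Int × PySem.Dict Int Int
  | 0, n, _, pf => (n, pf)
  | fuel+1, n, d, pf =>
    if PySem.Int.mod n d = 0 then
      pvDivLoop fuel (PySem.Int.floordiv n d) d (pf.modify d 0 (· + 1))
    else (n, pf)

-- outer `while n > 1: if n % d == 0: setdefault(d, 0); <inner>; d += 1` (fueled likewise)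
def pvFacLoop : Nat → Int → Int → PySem.Dict Int Int → PySem.Dict Int Int
  | 0, _, _, pf => pf
  | fuel+1, n, d, pf =>
    if 1 < n then
      let pf1 := if PySem.Int.mod n d = 0 then pf.setdefault d 0 else pf
      let r := pvDivLoop n.toNat n d pf1
      pvFacLoop fuel r.1 (d + 1) r.2
    else pf

def factors_of_factorial (N : Int) : Int :=
  let prime_factors : PySem.Dict Int Int := PySem.Dict.empty
  let prime_factors := (PySem.List.pyRange 2 (N + 1) 1).foldl
    (fun pf n => pvFacLoop n.toNat n 2 pf) prime_factors
  pvMul (prime_factors.values.map (fun p => p + 1)) (some ((10 : Int) ^ 9 + 7))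

-- ===== PORT B =====

-- `while i*i <= p: if p % i == 0: is_prime = False; break; i += 1` — i is kept as a Nat
-- counter (it starts at 2 and only increments), which gives the termination measure.
def pvTrialLoop (p : Int) (i : Nat) : Bool :=
  if _h : ((i : Int) * i) ≤ p then
    (if PySem.Int.mod p i = 0 then false else pvTrialLoop p (i + 1))
  else true
termination_by (p + 1 - (i : Int) * i).toNat
decreasing_by
  have h1 : ((i : Int)) * i < ((i : Int) + 1) * (↑i + 1) := by nlinarith [Int.natCast_nonneg i]
  push_cast
  omega

-- `while q <= N: e += N // q; q *= p` — the `2 ≤ p ∧ 1 ≤ q` conjuncts only make the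
-- recursion total (they hold at every real call: q starts at the prime p ≥ 2).
def pvLegLoop (N p q e : Int) : Int :=
  if h : q ≤ N ∧ 2 ≤ p ∧ 1 ≤ q then
    pvLegLoop N p (q * p) (e + PySem.Int.floordiv N q)
  else e
termination_by (N + 1 - q).toNat
decreasing_by
  have h1 : q * 2 ≤ q * p := by nlinarith
  omega

def factors_of_factorial_alt (N : Int) : Int :=
  (PySem.List.pyRange 2 (N + 1) 1).foldl
    (fun ans p =>
      if pvTrialLoop p 2 then
        PySem.Int.mod (ans * (pvLegLoop N p p 0 + 1)) ((10 : Int) ^ 9 + 7)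
      else ans) 1

-- ===== PRECONDITION & SPEC =====
def Spec_factors_of_factorial (N : Int) (out : Int) : Prop := out = factors_of_factorial_alt N
instance (N : Int) (out : Int) : Decidable (Spec_factors_of_factorial N out) := by unfold Spec_factors_of_factorial; infer_instance

-- ===== CLAIM (what is proved, stated in full; the proofs are below) =====
def Claim_equal_factors_of_factorial : Prop := ∀ (N : Int), Dom_factors_of_factorial N → Spec_factors_of_factorial N (factors_of_factorial N)

-- ===== LEMMAS AND PROOFS =====

-- a multiply-then-reduce fold is the product reduced once
theorem pv_foldmod (l : List Int) (a : Int) :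
    l.foldl (fun r v => r * v % 1000000007) (a % 1000000007) = (a * l.prod) % 1000000007 := by
  induction l generalizing a with
  | nil => simp
  | cons v t ih =>
    simp only [List.foldl_cons, List.prod_cons]
    rw [show a % 1000000007 * v % 1000000007 = (a * v) % 1000000007 by
      rw [Int.mul_emod, Int.emod_emod_of_dvd _ (dvd_refl _), ← Int.mul_emod], ih, ← mul_assoc]

theorem pvMul_eq (l : List Int) : pvMul l (some ((10 : Int) ^ 9 + 7)) = l.prod % 1000000007 := by
  have hm : ∀ a : Int, PySem.Int.mod a 1000000007 = a % 1000000007 :=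
    fun a => PySem.Int.mod_eq_emod_of_pos (by norm_num)
  unfold pvMul
  rw [show (10 : Int) ^ 9 + 7 = 1000000007 by norm_num]
  simp only [hm, if_neg (by norm_num : ¬ (1000000007 : Int) = 0)]
  have := pv_foldmod l 1
  norm_num at this
  simpa using this

-- B's inner loop finds the smallest divisor: characterisation
theorem pvTrialLoop_spec (p : Nat) : ∀ (m i : Nat), p + 1 - i * i = m →
    (pvTrialLoop (p : Int) i = true ↔ ∀ j, i ≤ j → j * j ≤ p → ¬ (j ∣ p)) := by
  intro m
  induction m using Nat.strong_induction_on with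
  | _ m ih =>
    intro i hm
    rw [pvTrialLoop]
    by_cases hle : (i : Int) * i ≤ (p : Int)
    · have hle' : i * i ≤ p := by exact_mod_cast hle
      rw [dif_pos hle]
      have hmod : (PySem.Int.mod (p : Int) (i : Nat) = 0) ↔ i ∣ p := by
        rw [PySem.Int.mod_natCast]
        norm_cast
        omega
      by_cases hdvd : i ∣ p
      · rw [if_pos (hmod.mpr hdvd)]
        simp only [Bool.false_eq_true, false_iff]
        intro h
        exact absurd hdvd (h i le_rfl hle')
      · rw [if_neg (fun h => hdvd (hmod.mp h))]
        rw [ih (p + 1 - (i+1) * (i+1)) (by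
          have : i * i < (i+1) * (i+1) := by nlinarith
          omega) (i+1) rfl]
        constructor
        · intro h j hij hjj
          rcases eq_or_lt_of_le hij with rfl | hlt
          · exact hdvd
          · exact h j hlt hjj
        · intro h j hij hjj
          exact h j (Nat.le_of_succ_le hij) hjj
    · rw [dif_neg hle]
      simp only [true_iff]
      intro j hij hjj hd
      exact hle (by exact_mod_cast le_trans (Nat.mul_le_mul hij hij) hjj)

theorem pvTrialLoop_prime (q : Nat) (hq : 2 ≤ q) :
    (pvTrialLoop (q : Int) 2 = true ↔ q.Prime) := by
  rw [pvTrialLoop_spec q _ 2 rfl, Nat.prime_def_le_sqrt]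
  constructor
  · intro h
    exact ⟨hq, fun m hm hms => h m hm (Nat.le_sqrt.mp hms)⟩
  · rintro ⟨-, h⟩ j h2j hjj
    exact h j h2j (Nat.le_sqrt.mpr hjj)

theorem pvTrialLoop_eq_decide (q : Nat) (hq : 2 ≤ q) :
    pvTrialLoop (q : Int) 2 = decide (Nat.Prime q) := by
  by_cases hp : Nat.Prime q
  · simp [hp, (pvTrialLoop_prime q hq).mpr hp]
  · simp only [hp, decide_false]
    rw [← Bool.not_eq_true]
    exact fun h => hp ((pvTrialLoop_prime q hq).mp h)

-- B's Legendre loop sums the quotients N // p^i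
theorem pvLegLoop_spec (Nn p : Nat) (hp : 2 ≤ p) : ∀ (m j : Nat) (e : Int), 1 ≤ j →
    Nn + 1 - p ^ j = m →
    pvLegLoop (Nn : Int) (p : Int) ((p ^ j : Nat) : Int) e
      = e + ((∑ i ∈ Finset.Ico j (Nat.log p Nn + 1), Nn / p ^ i : Nat) : Int) := by
  intro m
  induction m using Nat.strong_induction_on with
  | _ m ih =>
    intro j e hj hm
    rw [pvLegLoop]
    have hq1 : (1 : Int) ≤ ((p ^ j : Nat) : Int) := by
      exact_mod_cast Nat.one_le_iff_ne_zero.mpr (pow_ne_zero j (by omega))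
    by_cases hle : p ^ j ≤ Nn
    · have hN0 : Nn ≠ 0 := fun h => by
        subst h; exact absurd (Nat.le_zero.mp hle) (pow_ne_zero j (by omega))
      have hjlog : j ≤ Nat.log p Nn := (Nat.le_log_iff_pow_le (by omega) hN0).mpr hle
      rw [dif_pos ⟨by exact_mod_cast hle, by exact_mod_cast hp, hq1⟩]
      rw [PySem.Int.floordiv_natCast]
      have hcast : ((p ^ j : Nat) : Int) * (p : Int) = ((p ^ (j+1) : Nat) : Int) := by
        push_cast [pow_succ]; ring
      rw [hcast]
      have hdec : Nn + 1 - p ^ (j+1) < m := by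
        have h1 : p ^ j < p ^ (j+1) := Nat.pow_lt_pow_succ (by omega)
        omega
      rw [ih _ hdec (j+1) _ (by omega) rfl]
      rw [Finset.sum_eq_sum_Ico_succ_bot (show j < Nat.log p Nn + 1 by omega) (fun i => Nn / p ^ i)]
      push_cast
      ring
    · rw [dif_neg (fun hc => hle (by exact_mod_cast hc.1))]
      have : Nat.log p Nn + 1 ≤ j := by
        by_contra hcon
        push Not at hcon
        have hj' : j ≤ Nat.log p Nn := by omega
        have : p ^ j ≤ Nn := by
          rcases Nat.eq_zero_or_pos Nn with rfl | hN
          · simp [Nat.log_zero_right] at hj'; omega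
          · exact (Nat.le_log_iff_pow_le (by omega) (by omega)).mp hj'
        exact hle this
      rw [Finset.Ico_eq_empty (by omega)]
      simp

theorem pvLegLoop_fact (Nn q : Nat) (hq : q.Prime) :
    pvLegLoop (Nn : Int) (q : Int) (q : Int) 0 = ((Nat.factorial Nn).factorization q : Int) := by
  have h := pvLegLoop_spec Nn q hq.two_le (Nn + 1 - q ^ 1) 1 0 le_rfl rfl
  rw [pow_one] at h
  rw [h, Nat.factorization_factorial hq (Nat.lt_succ_self _)]
  simp

-- A's inner while-loop divides out the full power of d and counts it into the dict
theorem pvDivLoop_spec : ∀ (fuel n d : Nat) (pf : PySem.Dict Int Int), 1 ≤ n → 2 ≤ d → n ≤ fuel →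
    ∃ c : Nat, d ^ c ∣ n ∧ ¬ (d ∣ n / d ^ c) ∧
      (pvDivLoop fuel (n : Int) (d : Int) pf).1 = ((n / d ^ c : Nat) : Int) ∧
      ((pvDivLoop fuel (n : Int) (d : Int) pf).2.getD (d : Int) 0 = pf.getD (d : Int) 0 + c) ∧
      (∀ k : Int, k ≠ (d : Int) → (pvDivLoop fuel (n : Int) (d : Int) pf).2.getD k 0 = pf.getD k 0) ∧
      (∀ k : Int, k ∈ (pvDivLoop fuel (n : Int) (d : Int) pf).2.keys ↔ k ∈ pf.keys ∨ (k = (d : Int) ∧ 1 ≤ c)) ∧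
      (pf.keys.Nodup → (pvDivLoop fuel (n : Int) (d : Int) pf).2.keys.Nodup) := by
  intro fuel
  induction fuel with
  | zero => intro n d pf h1 h2 h3; omega
  | succ fuel ih =>
    intro n d pf h1 h2 h3
    by_cases hdvd : d ∣ n
    · have hmod : PySem.Int.mod (n : Int) (d : Int) = 0 := by
        rw [PySem.Int.mod_natCast]; norm_cast; omega
      have hnd1 : 1 ≤ n / d := (Nat.one_le_div_iff (by omega)).mpr (Nat.le_of_dvd (by omega) hdvd)
      have hndlt : n / d < n := Nat.div_lt_self (by omega) (by omega)
      obtain ⟨c, hc1, hc2, hc3, hc4, hc5, hc6, hc7⟩ :=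
        ih (n / d) d (pf.modify (d : Int) 0 (· + 1)) hnd1 h2 (by omega)
      have hstep : pvDivLoop (fuel+1) (n : Int) (d : Int) pf
          = pvDivLoop fuel ((n / d : Nat) : Int) (d : Int) (pf.modify (d : Int) 0 (· + 1)) := by
        simp only [pvDivLoop, hmod, if_pos, PySem.Int.floordiv_natCast]
      have hdivdiv : n / d / d ^ c = n / d ^ (c + 1) := by
        rw [Nat.div_div_eq_div_mul, ← pow_succ']
      have hkeysmod : ∀ k : Int, k ∈ (pf.modify (d : Int) 0 (· + 1)).keys ↔ k = (d : Int) ∨ k ∈ pf.keys := by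
        intro k
        rw [PySem.Dict.keys_modify, PySem.Dict.mem_keys_insert]
      refine ⟨c + 1, ?_, ?_, ?_, ?_, ?_, ?_, ?_⟩
      · rw [pow_succ']; exact (Nat.dvd_div_iff_mul_dvd hdvd).mp hc1
      · rwa [← hdivdiv]
      · rw [hstep, hc3, hdivdiv]
      · rw [hstep, hc4, PySem.Dict.getD_modify_self]; push_cast; ring
      · intro k hk
        rw [hstep, hc5 k hk, PySem.Dict.getD_modify, if_neg hk]
      · intro k
        rw [hstep, hc6 k, hkeysmod k]
        constructor
        · rintro ((rfl | h) | ⟨rfl, -⟩)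
          · exact Or.inr ⟨rfl, by omega⟩
          · exact Or.inl h
          · exact Or.inr ⟨rfl, by omega⟩
        · rintro (h | ⟨rfl, -⟩)
          · exact Or.inl (Or.inr h)
          · exact Or.inl (Or.inl rfl)
      · intro hnd
        rw [hstep]
        apply hc7
        have : (pf.modify (d : Int) 0 (· + 1)).keys = (pf.insert (d : Int) (pf.getD (d : Int) 0 + 1)).keys :=
          PySem.Dict.keys_modify pf (d : Int) 0 (· + 1)
        rw [this]
        exact PySem.Dict.nodup_keys_insert pf _ _ hnd
    · have hmod : ¬ (PySem.Int.mod (n : Int) (d : Int) = 0) := by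
        rw [PySem.Int.mod_natCast]
        norm_cast
        omega
      have hstep : pvDivLoop (fuel+1) (n : Int) (d : Int) pf = ((n : Int), pf) := by
        simp only [pvDivLoop, if_neg hmod]
      refine ⟨0, by simp, by simpa using hdvd, by simp [hstep], by simp [hstep], ?_, ?_, ?_⟩
      · intro k hk; rw [hstep]
      · intro k; rw [hstep]; simp
      · intro h; rwa [hstep]


-- A's outer while-loop adds the whole factorization of n to the dict
theorem pvFacLoop_spec : ∀ (fuel n d : Nat) (pf : PySem.Dict Int Int), 1 ≤ n → 2 ≤ d →
    (∀ k, 2 ≤ k → k < d → ¬ k ∣ n) → n + 2 ≤ fuel + d →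
    (∀ q : Nat, (pvFacLoop fuel (n : Int) (d : Int) pf).getD (q : Int) 0
        = pf.getD (q : Int) 0 + n.factorization q) ∧
    (∀ k : Int, k ∈ (pvFacLoop fuel (n : Int) (d : Int) pf).keys ↔
        k ∈ pf.keys ∨ ∃ q : Nat, k = (q : Int) ∧ n.factorization q ≠ 0) ∧
    (pf.keys.Nodup → (pvFacLoop fuel (n : Int) (d : Int) pf).keys.Nodup) := by
  intro fuel
  induction fuel with
  | zero =>
    intro n d pf h1 h2 hinv hfd
    have hn1 : n = 1 := by
      by_contra hn
      have h2n : 2 ≤ n := by omega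
      have := hinv n.minFac (Nat.minFac_prime (by omega)).two_le
        (by have := Nat.minFac_le (show 0 < n by omega); omega) n.minFac_dvd
      exact this
    subst hn1
    simp [pvFacLoop, Nat.factorization_one]
  | succ fuel ih =>
    intro n d pf h1 h2 hinv hfd
    by_cases hn1 : n = 1
    · subst hn1
      simp [pvFacLoop, Nat.factorization_one]
    · have h2n : 2 ≤ n := by omega
      have hgt : (1 : Int) < (n : Int) := by exact_mod_cast h2n
      by_cases hdvd : d ∣ n
      -- d divides n: d is prime here (all smaller candidates were divided out)
      · have hmod : PySem.Int.mod (n : Int) (d : Int) = 0 := by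
          rw [PySem.Int.mod_natCast]; norm_cast; omega
        have hprime : d.Prime := by
          have hmf : d.minFac = d := by
            have h1' := Nat.minFac_le (show 0 < d by omega)
            have h2' := (Nat.minFac_prime (show d ≠ 1 by omega)).two_le
            by_contra hne
            exact hinv d.minFac h2' (by omega) (d.minFac_dvd.trans hdvd)
          rw [← hmf]; exact Nat.minFac_prime (by omega)
        set pf1 := pf.setdefault (d : Int) 0 with hpf1def
        have hpf1getD : pf1.getD (d : Int) 0 = pf.getD (d : Int) 0 :=
          PySem.Dict.getD_setdefault_self pf (d : Int) 0 0
        have hpf1getDne : ∀ k : Int, k ≠ (d : Int) → pf1.getD k 0 = pf.getD k 0 := by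
          intro k hk
          rw [PySem.Dict.getD_eq_get?_getD, PySem.Dict.get?_setdefault_of_ne pf 0 hk,
            ← PySem.Dict.getD_eq_get?_getD]
        have hpf1keys : ∀ k : Int, k ∈ pf1.keys ↔ k = (d : Int) ∨ k ∈ pf.keys := by
          intro k
          by_cases hco : pf.contains (d : Int)
          · rw [hpf1def, PySem.Dict.setdefault_of_contains pf 0 hco]
            constructor
            · exact Or.inr
            · rintro (rfl | h)
              · exact (PySem.Dict.contains_iff_mem_keys pf _).mp hco
              · exact h
          · rw [hpf1def, PySem.Dict.setdefault_of_not_contains pf 0 (by simpa using hco),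
              PySem.Dict.mem_keys_insert]
        have hpf1nodup : pf.keys.Nodup → pf1.keys.Nodup := by
          intro h
          by_cases hco : pf.contains (d : Int)
          · rwa [hpf1def, PySem.Dict.setdefault_of_contains pf 0 hco]
          · rw [hpf1def, PySem.Dict.setdefault_of_not_contains pf 0 (by simpa using hco)]
            exact PySem.Dict.nodup_keys_insert pf _ _ h
        obtain ⟨c, hc1, hc2, hc3, hc4, hc5, hc6, hc7⟩ :=
          pvDivLoop_spec n n d pf1 (by omega) h2 le_rfl
        -- c is exactly the multiplicity of d in n
        have hn0 : n ≠ 0 := by omega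
        have hcfac : c = n.factorization d := by
          have hle' : c ≤ n.factorization d :=
            (Nat.Prime.pow_dvd_iff_le_factorization hprime hn0).mp hc1
          have hnot : ¬ d ^ (c+1) ∣ n := by
            intro h
            exact hc2 ((Nat.dvd_div_iff_mul_dvd hc1).mpr (by rwa [← pow_succ]))
          have hlt : n.factorization d < c + 1 := by
            by_contra hcon
            exact hnot ((Nat.Prime.pow_dvd_iff_le_factorization hprime hn0).mpr (by omega))
          omega
        have hcpos : 1 ≤ c := by
          rw [hcfac]
          exact (Nat.Prime.factorization_pos_of_dvd hprime hn0 hdvd)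
        set m := n / d ^ c with hmdef
        have hmn : m * d ^ c = n := Nat.div_mul_cancel hc1
        have hm0 : m ≠ 0 := by
          intro h; rw [h, zero_mul] at hmn; omega
        have hmdvd : m ∣ n := ⟨d ^ c, hmn.symm⟩
        have hfacq : ∀ q, n.factorization q = m.factorization q + (if d = q then c else 0) := by
          intro q
          conv_lhs => rw [← hmn]
          rw [Nat.factorization_mul hm0 (pow_ne_zero _ (by omega)),
            Nat.Prime.factorization_pow hprime]
          simp [Finsupp.single_apply]
        have hmfacd : m.factorization d = 0 := by
          have h0 := hfacq d
          rw [if_pos rfl] at h0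
          omega
        have hminv : ∀ k, 2 ≤ k → k < d + 1 → ¬ k ∣ m := by
          intro k hk2 hkd hkm
          rcases Nat.lt_or_ge k d with hlt | hge
          · exact hinv k hk2 hlt (hkm.trans hmdvd)
          · have : k = d := by omega
            subst this
            exact hc2 hkm
        have hmle : m ≤ n := Nat.le_of_dvd (by omega) hmdvd
        obtain ⟨ihg, ihk, ihn⟩ := ih m (d + 1)
          (pvDivLoop n (n : Int) (d : Int) pf1).2
          (Nat.one_le_iff_ne_zero.mpr hm0) (by omega) hminv (by omega)
        have hstep : pvFacLoop (fuel+1) (n : Int) (d : Int) pf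
            = pvFacLoop fuel ((m : Nat) : Int) ((d+1 : Nat) : Int)
                (pvDivLoop n (n : Int) (d : Int) pf1).2 := by
          simp only [pvFacLoop, if_pos hgt, hmod, if_pos, Int.toNat_natCast]
          rw [hc3]
          push_cast
          rfl
        refine ⟨?_, ?_, ?_⟩
        · intro q
          rw [hstep, ihg q]
          by_cases hq : q = d
          · subst hq
            rw [hc4, hpf1getD, hmfacd, hcfac]
            push_cast
            ring
          · have hq' : (q : Int) ≠ (d : Int) := by exact_mod_cast hq
            rw [hc5 _ hq', hpf1getDne _ hq', hfacq q, if_neg (fun h => hq h.symm)]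
            push_cast
            ring
        · intro k
          rw [hstep, ihk k]
          have hnfac : ∀ q : Nat, n.factorization q ≠ 0 ↔ (q = d ∨ m.factorization q ≠ 0) := by
            intro q
            rw [hfacq q]
            by_cases hq : d = q
            · subst hq; simp; omega
            · rw [if_neg hq]
              simp only [add_zero]
              constructor
              · exact fun h => Or.inr h
              · rintro (rfl | h)
                · exact absurd rfl (fun h' => hq h'.symm)
                · exact h
          constructor
          · rintro (h | ⟨q, rfl, hq⟩)
            · rw [hc6 k] at h
              rcases h with h | ⟨rfl, -⟩
              · rw [hpf1keys k] at h
                rcases h with rfl | h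
                · exact Or.inr ⟨d, rfl, (hnfac d).mpr (Or.inl rfl)⟩
                · exact Or.inl h
              · exact Or.inr ⟨d, rfl, (hnfac d).mpr (Or.inl rfl)⟩
            · exact Or.inr ⟨q, rfl, (hnfac q).mpr (Or.inr hq)⟩
          · rintro (h | ⟨q, rfl, hq⟩)
            · exact Or.inl ((hc6 k).mpr (Or.inl ((hpf1keys k).mpr (Or.inr h))))
            · rcases (hnfac q).mp hq with rfl | hq'
              · exact Or.inl ((hc6 _).mpr (Or.inr ⟨rfl, hcpos⟩))
              · exact Or.inr ⟨q, rfl, hq'⟩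
        · intro hnd
          rw [hstep]
          exact ihn (hc7 (hpf1nodup hnd))
      -- d does not divide n: nothing changes this round
      · have hmod : ¬ (PySem.Int.mod (n : Int) (d : Int) = 0) := by
          rw [PySem.Int.mod_natCast]; norm_cast; omega
        obtain ⟨c, hc1, hc2, hc3, hc4, hc5, hc6, hc7⟩ :=
          pvDivLoop_spec n n d pf (by omega) h2 le_rfl
        have hc0 : c = 0 := by
          by_contra hc
          exact hdvd ((dvd_pow_self d hc).trans hc1)
        subst hc0
        simp only [pow_zero, Nat.div_one] at hc3
        obtain ⟨ihg, ihk, ihn⟩ := ih n (d + 1)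
          (pvDivLoop n (n : Int) (d : Int) pf).2
          (by omega) (by omega)
          (by
            intro k hk2 hkd hkm
            rcases Nat.lt_or_ge k d with hlt | hge
            · exact hinv k hk2 hlt hkm
            · have : k = d := by omega
              subst this
              exact hdvd hkm)
          (by omega)
        have hstep : pvFacLoop (fuel+1) (n : Int) (d : Int) pf
            = pvFacLoop fuel ((n : Nat) : Int) ((d+1 : Nat) : Int)
                (pvDivLoop n (n : Int) (d : Int) pf).2 := by
          have hif : (if PySem.Int.mod ((n : Nat) : Int) ((d : Nat) : Int) = 0
              then pf.setdefault ((d : Nat) : Int) 0 else pf) = pf := if_neg hmod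
          simp only [pvFacLoop, if_pos hgt, hif, Int.toNat_natCast]
          rw [hc3]
          push_cast
          rfl
        refine ⟨?_, ?_, ?_⟩
        · intro q
          rw [hstep, ihg q]
          by_cases hq : (q : Int) = (d : Int)
          · rw [hq, hc4]; push_cast; ring
          · rw [hc5 _ hq]
        · intro k
          rw [hstep, ihk k]
          have : ∀ x : Int, x ∈ (pvDivLoop n (n : Int) (d : Int) pf).2.keys ↔ x ∈ pf.keys := by
            intro x
            rw [hc6 x]
            simp
          rw [this k]
        · intro hnd
          rw [hstep]
          exact ihn (hc7 hnd)


-- A's for-loop over 2..N builds the factorization of N!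
theorem pvRangeFold_spec (m : Nat) (hm : 1 ≤ m) :
    (∀ q : Nat, ((PySem.List.pyRange 2 ((m : Int) + 1) 1).foldl
        (fun pf n => pvFacLoop n.toNat n 2 pf) PySem.Dict.empty).getD (q : Int) 0
        = ((Nat.factorial m).factorization q : Int)) ∧
    (∀ k : Int, k ∈ ((PySem.List.pyRange 2 ((m : Int) + 1) 1).foldl
        (fun pf n => pvFacLoop n.toNat n 2 pf) PySem.Dict.empty).keys ↔
        ∃ q : Nat, k = (q : Int) ∧ (Nat.factorial m).factorization q ≠ 0) ∧
    ((PySem.List.pyRange 2 ((m : Int) + 1) 1).foldl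
        (fun pf n => pvFacLoop n.toNat n 2 pf) PySem.Dict.empty).keys.Nodup := by
  induction m with
  | zero => omega
  | succ m ihm =>
    rcases Nat.eq_zero_or_pos m with rfl | hm1
    · have hnil : PySem.List.pyRange 2 (((0:Nat)+1 : Nat) + 1) 1 = [] := by
        apply PySem.List.pyRange_one_eq_nil
        norm_num
      rw [show (((0:Nat)+1 : Nat) : Int) + 1 = (2:Int) by norm_num] at *
      rw [PySem.List.pyRange_one_eq_nil le_rfl]
      refine ⟨?_, ?_, ?_⟩
      · intro q
        simp [PySem.Dict.getD_empty, Nat.factorization_one]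
      · intro k
        simp [PySem.Dict.keys_empty, Nat.factorization_one]
      · simp [PySem.Dict.keys_empty]
    · obtain ⟨ih1, ih2, ih3⟩ := ihm hm1
      have hsplit : PySem.List.pyRange 2 (((m+1 : Nat) : Int) + 1) 1
          = PySem.List.pyRange 2 ((m : Int) + 1) 1 ++ [(m : Int) + 1] := by
        have h := PySem.List.pyRange_one_succ_right (a := 2) (b := (m : Int) + 1) (by
          have : (1 : Int) ≤ (m : Int) := by exact_mod_cast hm1
          omega)
        rw [← h]
        norm_num
      rw [hsplit, List.foldl_append, List.foldl_cons, List.foldl_nil]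
      set F := (PySem.List.pyRange 2 ((m : Int) + 1) 1).foldl
        (fun pf n => pvFacLoop n.toNat n 2 pf) PySem.Dict.empty with hF
      have e1 : ((m : Int) + 1).toNat = m + 1 := by omega
      have e2 : ((m : Int) + 1) = ((m + 1 : Nat) : Int) := by push_cast; ring
      have e3 : (((2 : Nat) : Int)) = (2 : Int) := by norm_num
      rw [e1, e2]
      obtain ⟨hg, hk, hnd⟩ := pvFacLoop_spec (m+1) (m+1) 2 F
        (by omega) le_rfl (by intro k hk2 hk2'; omega) (by omega)
      rw [e3] at hg hk hnd
      have hfadd : ∀ q, (Nat.factorial (m+1)).factorization q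
          = (m+1).factorization q + (Nat.factorial m).factorization q := by
        intro q
        rw [Nat.factorial_succ, Nat.factorization_mul (by omega) (Nat.factorial_ne_zero m)]
        simp
      refine ⟨?_, ?_, hnd ih3⟩
      · intro q
        rw [hg q, ih1 q, hfadd q]
        push_cast
        ring
      · intro k
        rw [hk k]
        constructor
        · rintro (h | ⟨q, rfl, hq⟩)
          · obtain ⟨q, rfl, hq⟩ := (ih2 k).mp h
            exact ⟨q, rfl, by rw [hfadd]; omega⟩
          · exact ⟨q, rfl, by rw [hfadd]; omega⟩
        · rintro ⟨q, rfl, hq⟩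
          rw [hfadd q] at hq
          rcases Nat.eq_zero_or_pos ((Nat.factorial m).factorization q) with h0 | hpos
          · exact Or.inr ⟨q, rfl, by omega⟩
          · exact Or.inl ((ih2 _).mpr ⟨q, rfl, by omega⟩)


-- the exponent of a prime is nonzero in m! exactly for the primes 2..m
theorem pv_fact_ne (m q : Nat) :
    (Nat.factorial m).factorization q ≠ 0 ↔ (2 ≤ q ∧ q < m + 1 ∧ q.Prime) := by
  constructor
  · intro h
    have hp : q.Prime := by
      by_contra hq
      exact h (Nat.factorization_eq_zero_of_not_prime _ hq)
    have hdvd : q ∣ Nat.factorial m := Nat.dvd_of_factorization_pos h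
    have := (Nat.Prime.dvd_factorial hp).mp hdvd
    exact ⟨hp.two_le, by omega, hp⟩
  · rintro ⟨h2, hlt, hp⟩
    have : 0 < (Nat.factorial m).factorization q :=
      Nat.Prime.factorization_pos_of_dvd hp (Nat.factorial_ne_zero m)
        ((Nat.Prime.dvd_factorial hp).mpr (by omega))
    omega

theorem factors_of_factorial_agree (N : Int) :
    factors_of_factorial N = factors_of_factorial_alt N := by
  by_cases hN : N + 1 ≤ 2
  · have hnil : PySem.List.pyRange 2 (N + 1) 1 = [] := PySem.List.pyRange_one_eq_nil hN
    simp [factors_of_factorial, factors_of_factorial_alt, hnil, pvMul,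
      PySem.Dict.empty, PySem.Dict.values]
  · obtain ⟨m, rfl⟩ : ∃ m : Nat, N = (m : Int) := ⟨N.toNat, by omega⟩
    have hm2 : 2 ≤ m := by exact_mod_cast show (2 : Int) ≤ (m : Int) by omega
    obtain ⟨hg, hk, hnd⟩ := pvRangeFold_spec m (by omega)
    set F := (PySem.List.pyRange 2 ((m : Int) + 1) 1).foldl
      (fun pf n => pvFacLoop n.toNat n 2 pf) PySem.Dict.empty with hF
    set Pl := (List.range' 2 (m - 1)).filter (fun q => decide (Nat.Prime q)) with hPl
    have hPlmem : ∀ q : Nat, q ∈ Pl ↔ (2 ≤ q ∧ q < m + 1 ∧ q.Prime) := by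
      intro q
      rw [hPl, List.mem_filter, List.mem_range'_1]
      constructor
      · rintro ⟨⟨ha, hb⟩, hc⟩
        exact ⟨ha, by omega, by simpa using hc⟩
      · rintro ⟨ha, hb, hc⟩
        exact ⟨⟨ha, by omega⟩, by simpa using hc⟩
    -- the A side: product of (exponent + 1) over the dict values
    have hA : factors_of_factorial (m : Int)
        = (F.keys.map (fun k => F.getD k 0 + 1)).prod % 1000000007 := by
      simp only [factors_of_factorial, ← hF]
      rw [PySem.Dict.values_eq_map_keys F hnd 0, List.map_map, pvMul_eq]
      rfl
    -- the B side: the same product over the primes of the range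
    have hrange : PySem.List.pyRange 2 ((m : Int) + 1) 1
        = (List.range' 2 (m - 1)).map (Nat.cast : Nat → Int) := by
      rw [PySem.List.pyRange_one, show ((m : Int) + 1 - 2).toNat = m - 1 by omega,
        List.range'_eq_map_range, List.map_map]
      apply List.map_congr_left
      intro k _
      simp only [Function.comp_apply]
      push_cast
      ring
    have hfilter : (PySem.List.pyRange 2 ((m : Int) + 1) 1).filter (fun p => pvTrialLoop p 2)
        = Pl.map (Nat.cast : Nat → Int) := by
      rw [hrange, List.filter_map, hPl]
      congr 1
      apply List.filter_congr
      intro q hq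
      have h2q : 2 ≤ q := (List.mem_range'_1.mp hq).1
      simp only [Function.comp_apply]
      exact pvTrialLoop_eq_decide q h2q
    have hB : factors_of_factorial_alt (m : Int)
        = ((Pl.map (Nat.cast : Nat → Int)).map (fun p => pvLegLoop (m : Int) p p 0 + 1)).prod
            % 1000000007 := by
      unfold factors_of_factorial_alt
      have hfun : (fun (ans p : Int) =>
            if pvTrialLoop p 2 = true then
              PySem.Int.mod (ans * (pvLegLoop (m : Int) p p 0 + 1)) ((10 : Int) ^ 9 + 7)
            else ans)
          = fun ans p => if pvTrialLoop p 2 = true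
              then ans * (pvLegLoop (m : Int) p p 0 + 1) % 1000000007 else ans := by
        funext ans p
        rw [show (10 : Int) ^ 9 + 7 = 1000000007 by norm_num,
          PySem.Int.mod_eq_emod_of_pos (by norm_num : (0 : Int) < 1000000007)]
      rw [hfun, ← List.foldl_filter, hfilter, ← List.foldl_map
        (f := fun p => pvLegLoop (m : Int) p p 0 + 1)
        (g := fun a v => a * v % 1000000007)]
      have := pv_foldmod ((Pl.map (Nat.cast : Nat → Int)).map
        (fun p => pvLegLoop (m : Int) p p 0 + 1)) 1
      norm_num at this
      simpa using this
    -- the two products agree: same multiset of keys, same value per key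
    have hndPl : (Pl.map (Nat.cast : Nat → Int)).Nodup := by
      refine List.Nodup.map Nat.cast_injective ?_
      exact (List.nodup_range').filter _
    have hperm : F.keys.Perm (Pl.map (Nat.cast : Nat → Int)) := by
      rw [List.perm_ext_iff_of_nodup hnd hndPl]
      intro k
      rw [hk k, List.mem_map]
      constructor
      · rintro ⟨q, rfl, hq⟩
        exact ⟨q, (hPlmem q).mpr ((pv_fact_ne m q).mp hq), rfl⟩
      · rintro ⟨q, hq, rfl⟩
        exact ⟨q, rfl, (pv_fact_ne m q).mpr ((hPlmem q).mp hq)⟩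
    rw [hA, hB, (hperm.map (fun k => F.getD k 0 + 1)).prod_eq]
    congr 1
    rw [List.map_map, List.map_map]
    congr 1
    apply List.map_congr_left
    intro q hq
    obtain ⟨h2q, hltq, hpq⟩ := (hPlmem q).mp hq
    simp only [Function.comp_apply]
    rw [hg q, pvLegLoop_fact m q hpq]

-- ===== VERDICT (by name: the statement is the Claim_ definition above) =====
theorem factors_of_factorial_spec : Claim_equal_factors_of_factorial := by
  intro N _
  unfold Spec_factors_of_factorial
  exact factors_of_factorial_agree N
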